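-- pv_equiv track=rewrite | github.com/thesadru/culturebot | culturebot/components/swears.py | count_swears
-- ===== SOURCE A (Python) =====
-- import collections
-- import typing
--
-- INFLECTIONS = ["", "s", "es", "ed", "ing", "in", "ly", "ed", "er", "est"]
--
-- def count_swears(text: str, swears: typing.Mapping[str, str]) -> collections.Counter[str]:
--     """Count swears in text."""
--     counter: collections.Counter[str] = collections.Counter()
--     for word in text.split():
--         for inflection in INFLECTIONS:
--             if word.endswith(inflection) and word.removesuffix(inflection) in swears:
--                 counter.update({swears[word.removesuffix(inflection)]: 1})
--                 break
--
--     return counter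
-- ===== SOURCE B (Python) =====
-- import collections
-- import typing
--
-- INFLECTIONS = ["", "s", "es", "ed", "ing", "in", "ly", "ed", "er", "est"]
--
-- def count_swears(text: str, swears: typing.Mapping[str, str]) -> collections.Counter[str]:
--     """Count swears in text."""
--     forms: dict = {}
--     for inflection in INFLECTIONS:
--         for root, category in swears.items():
--             forms.setdefault(root + inflection, category)
--     counter: collections.Counter[str] = collections.Counter()
--     for word in text.split():
--         category = forms.get(word)
--         if category is not None:
--             counter[category] += 1
--     return counter
-- ===== Notes on version B (the rewrite author's own statement) =====
-- stated objective: idiomatic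
-- what changed: B precomputes one dict mapping every inflected surface form to its category (setdefault so the earliest inflection wins, matching A's break) and then does a single O(1) lookup per word, replacing A's per-word 10-way suffix-strip-and-lookup inner loop.
import Mathlib
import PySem

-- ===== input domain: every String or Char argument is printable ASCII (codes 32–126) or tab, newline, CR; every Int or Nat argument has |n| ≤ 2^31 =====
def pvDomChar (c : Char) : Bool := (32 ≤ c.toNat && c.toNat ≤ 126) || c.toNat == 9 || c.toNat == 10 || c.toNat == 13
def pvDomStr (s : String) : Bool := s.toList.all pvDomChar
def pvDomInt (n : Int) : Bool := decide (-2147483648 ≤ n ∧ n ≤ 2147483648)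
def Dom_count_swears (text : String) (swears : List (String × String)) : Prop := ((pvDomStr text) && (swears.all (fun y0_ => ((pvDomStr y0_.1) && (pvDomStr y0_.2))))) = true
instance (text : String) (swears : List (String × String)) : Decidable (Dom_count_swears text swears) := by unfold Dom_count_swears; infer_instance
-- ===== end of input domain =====

-- B builds one form→category dict up front (setdefault keeps A's earliest-inflection priority)
-- and does a single lookup per word, instead of A's per-word 10-way suffix-strip inner loop.

-- ===== PORT A =====
def INFLECTIONS : List String := ["", "s", "es", "ed", "ing", "in", "ly", "ed", "er", "est"]

-- exact port of Python str.removesuffix (drop the suffix iff it is one)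
def pyRemovesuffix (s suf : String) : String :=
  if PySem.Str.endswith s suf then String.ofList (s.toList.take (s.toList.length - suf.toList.length)) else s

-- the inner `for inflection in INFLECTIONS: … break` loop of A
def csLoop (swears : List (String × String)) (word : String)
    (counter : PySem.Dict String Int) : List String → PySem.Dict String Int
  | [] => counter
  | infl :: rest =>
    if PySem.Str.endswith word infl then
      match swears.find? (fun p => p.1 == pyRemovesuffix word infl) with
      | some p => counter.modify p.2 0 (· + 1)
      | none => csLoop swears word counter rest
    else csLoop swears word counter rest

def count_swears (text : String) (swears : List (String × String)) : List (String × Int) :=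
  ((PySem.Str.split₀ text).foldl (fun c w => csLoop swears w c INFLECTIONS) PySem.Dict.empty).items

-- ===== PORT B =====
def count_swears_alt (text : String) (swears : List (String × String)) : List (String × Int) :=
  let forms : PySem.Dict String String :=
    INFLECTIONS.foldl
      (fun f infl => swears.foldl (fun f p => f.setdefault (p.1 ++ infl) p.2) f)
      PySem.Dict.empty
  ((PySem.Str.split₀ text).foldl
      (fun c w =>
        match forms.get? w with
        | some cat => c.modify cat 0 (· + 1)
        | none => c)
      PySem.Dict.empty).items

-- ===== PRECONDITION & SPEC =====
def Spec_count_swears (text : String) (swears : List (String × String)) (out : List (String × Int)) : Prop := out = count_swears_alt text swears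
instance (text : String) (swears : List (String × String)) (out : List (String × Int)) : Decidable (Spec_count_swears text swears out) := by unfold Spec_count_swears; infer_instance

-- ===== CLAIM (what is proved, stated in full; the proofs are below) =====
def Claim_equal_count_swears : Prop := ∀ (text : String) (swears : List (String × String)), Dom_count_swears text swears → Spec_count_swears text swears (count_swears text swears)

-- ===== LEMMAS AND PROOFS =====

-- the category A's inner loop would pick for word k, phrased over the flattened (form, category) pairs
def bPick (swears : List (String × String)) : List String → String → Option String
  | [], _ => none
  | i :: r, k =>
    (((swears.map (fun p => (p.1 ++ i, p.2))).find? (fun p => p.1 == k)).map (·.2)).or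
      (bPick swears r k)

theorem get?_foldl_setdefault (ps : List (String × String)) (d : PySem.Dict String String)
    (k : String) :
    (ps.foldl (fun f p => f.setdefault p.1 p.2) d).get? k
      = (d.get? k).or ((ps.find? (fun p => p.1 == k)).map (·.2)) := by
  induction ps generalizing d with
  | nil => simp
  | cons p rest ih =>
    rw [List.foldl_cons, ih]
    by_cases h : p.1 = k
    · rw [List.find?_cons_of_pos (by simp [h]), h, PySem.Dict.get?_setdefault_self]
      cases hd : d.get? k <;> simp
    · rw [List.find?_cons_of_neg (by simp [h]),
        PySem.Dict.get?_setdefault_of_ne d p.2 (Ne.symm h)]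

theorem strings_append_iff (a i k : String) :
    a ++ i = k ↔ a.toList ++ i.toList = k.toList := by
  constructor
  · intro h; subst h; simp
  · intro h; have := congrArg String.ofList h; simpa using this

theorem append_eq_iff_removesuffix (i k : String) (he : PySem.Str.endswith k i = true)
    (a : String) : (a ++ i = k) ↔ a = pyRemovesuffix k i := by
  have hsuf : i.toList <:+ k.toList := by
    rw [PySem.Str.endswith_eq] at he
    exact (PySem.Chars.endswith_iff k.toList i.toList).mp he
  obtain ⟨pre, hpre⟩ := hsuf
  have hstrip : pyRemovesuffix k i = String.ofList pre := by
    unfold pyRemovesuffix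
    rw [if_pos he, ← hpre]
    congr 1
    have hlen : (pre ++ i.toList).length - i.toList.length = pre.length := by
      simp
    rw [hlen, List.take_left]
  rw [strings_append_iff, ← hpre, List.append_left_inj, hstrip]
  constructor
  · intro h; subst h; simp
  · intro h; have := congrArg String.toList h; simpa using this

theorem append_ne_of_not_endswith (i k : String) (he : PySem.Str.endswith k i = false)
    (a : String) : a ++ i ≠ k := by
  intro h
  have h2 : PySem.Str.endswith k i = true := by
    rw [PySem.Str.endswith_eq]
    refine (PySem.Chars.endswith_iff k.toList i.toList).mpr ?_
    subst h; simp
  rw [h2] at he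
  exact absurd he (by simp)

theorem find?_map_append (swears : List (String × String)) (i k : String) :
    ((swears.map (fun p => (p.1 ++ i, p.2))).find? (fun p => p.1 == k)).map (·.2)
      = if PySem.Str.endswith k i then
          (swears.find? (fun p => p.1 == pyRemovesuffix k i)).map (·.2)
        else none := by
  by_cases he : PySem.Str.endswith k i = true
  · rw [if_pos he]
    induction swears with
    | nil => simp
    | cons p rest ih =>
      have hpred : ((p.1 ++ i) == k) = (p.1 == pyRemovesuffix k i) := by
        by_cases h : p.1 ++ i = k
        · have hp : p.1 = pyRemovesuffix k i := (append_eq_iff_removesuffix i k he p.1).mp h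
          have l1 : (p.1 ++ i == k) = true := by simp [h]
          have l2 : (p.1 == pyRemovesuffix k i) = true := by simp [hp]
          rw [l1, l2]
        · have h2 : p.1 ≠ pyRemovesuffix k i :=
            fun hh => h ((append_eq_iff_removesuffix i k he p.1).mpr hh)
          simp [h, h2]
      cases hb : (p.1 == pyRemovesuffix k i) with
      | true =>
        simp only [List.map_cons, List.find?_cons, hpred, hb]
        simp
      | false =>
        simp only [List.map_cons, List.find?_cons, hpred, hb]
        exact ih
  · rw [if_neg he]
    have : (swears.map (fun p => (p.1 ++ i, p.2))).find? (fun p => p.1 == k) = none := by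
      rw [List.find?_eq_none]
      rintro ⟨x1, x2⟩ hx
      simp only [List.mem_map] at hx
      obtain ⟨q, -, hq⟩ := hx
      have : x1 = q.1 ++ i := by cases hq; rfl
      subst this
      simpa using append_ne_of_not_endswith i k (Bool.eq_false_iff.mpr he) q.1
    simp [this]

theorem csLoop_eq_bPick (swears : List (String × String)) (word : String)
    (c : PySem.Dict String Int) (infls : List String) :
    csLoop swears word c infls
      = match bPick swears infls word with
        | some cat => c.modify cat 0 (· + 1)
        | none => c := by
  induction infls with
  | nil => rfl
  | cons i r ih =>
    simp only [csLoop, bPick, find?_map_append]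
    by_cases he : PySem.Str.endswith word i = true
    · rw [if_pos he, if_pos he]
      cases h : swears.find? (fun p => p.1 == pyRemovesuffix word i) with
      | some p => simp
      | none => simp [ih]
    · rw [if_neg he, if_neg he]
      simp [ih]

theorem forms_get?_eq_bPick (swears : List (String × String)) (infls : List String)
    (d : PySem.Dict String String) (k : String) :
    (infls.foldl (fun f infl => swears.foldl (fun f p => f.setdefault (p.1 ++ infl) p.2) f) d).get? k
      = (d.get? k).or (bPick swears infls k) := by
  induction infls generalizing d with
  | nil => simp [bPick]
  | cons i r ih =>
    simp only [List.foldl_cons, ih, bPick]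
    have : swears.foldl (fun f p => f.setdefault (p.1 ++ i) p.2) d
        = (swears.map (fun p => (p.1 ++ i, p.2))).foldl (fun f p => f.setdefault p.1 p.2) d := by
      rw [List.foldl_map]
    rw [this, get?_foldl_setdefault, Option.or_assoc]

-- ===== VERDICT (by name: the statement is the Claim_ definition above) =====
theorem count_swears_spec : Claim_equal_count_swears := by
  intro text swears _
  unfold Spec_count_swears
  simp only [count_swears, count_swears_alt]
  have hf : (fun (c : PySem.Dict String Int) w => csLoop swears w c INFLECTIONS)
      = (fun (c : PySem.Dict String Int) w =>
          match (INFLECTIONS.foldl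
              (fun f infl => swears.foldl (fun f p => f.setdefault (p.1 ++ infl) p.2) f)
              PySem.Dict.empty).get? w with
          | some cat => c.modify cat 0 (· + 1)
          | none => c) := by
    funext c w
    rw [csLoop_eq_bPick, forms_get?_eq_bPick]
    simp
  rw [hf]
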